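-- pv_equiv track=rewrite | github.com/jamartbr/AoC_25 | vis/day_3.py | show_select
-- ===== SOURCE A (Python) =====
-- COLOR_BLANCO = "\033[97m" # Color inicial
--
-- COLOR_VERDE = "\033[92m"  # Color de selección
--
-- COLOR_GRIS = "\033[90m"   # Para "desaparecer" (hacer tenue)
--
-- def show_select(line, sol):
--     out = ''
--     k=0
--     for char in line:
--         if k<len(sol) and char == sol[k]:
--             # Pone el dígito seleccionado en VERDE
--             out += f"{COLOR_VERDE}{char}{COLOR_BLANCO}"
--             k += 1
--         else:
--             # Los no seleccionados quedan en gris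
--             out += f"{COLOR_GRIS}{char}"
--     return out
-- ===== SOURCE B (Python) =====
-- COLOR_BLANCO = "\033[97m" # Color inicial
--
-- COLOR_VERDE = "\033[92m"  # Color de selección
--
-- COLOR_GRIS = "\033[90m"   # Para "desaparecer" (hacer tenue)
--
-- def show_select(line, sol):
--     # Pass 1: greedy subsequence match -> set of selected indices.
--     selected = set()
--     k = 0
--     for i, char in enumerate(line):
--         if k < len(sol) and char == sol[k]:
--             selected.add(i)
--             k += 1
--     # Pass 2: render each char according to whether its index was selected.
--     parts = []
--     for i, char in enumerate(line):
--         if i in selected: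
--             parts.append(f"{COLOR_VERDE}{char}{COLOR_BLANCO}")
--         else:
--             parts.append(f"{COLOR_GRIS}{char}")
--     return ''.join(parts)
-- ===== Notes on version B (the rewrite author's own statement) =====
-- stated objective: alternative
-- what changed: Single accumulator loop interleaving matching and rendering is split into two passes: one greedy pointer pass that records the set of selected indices, then an enumerate/render pass joining per-char pieces.
import Mathlib
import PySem

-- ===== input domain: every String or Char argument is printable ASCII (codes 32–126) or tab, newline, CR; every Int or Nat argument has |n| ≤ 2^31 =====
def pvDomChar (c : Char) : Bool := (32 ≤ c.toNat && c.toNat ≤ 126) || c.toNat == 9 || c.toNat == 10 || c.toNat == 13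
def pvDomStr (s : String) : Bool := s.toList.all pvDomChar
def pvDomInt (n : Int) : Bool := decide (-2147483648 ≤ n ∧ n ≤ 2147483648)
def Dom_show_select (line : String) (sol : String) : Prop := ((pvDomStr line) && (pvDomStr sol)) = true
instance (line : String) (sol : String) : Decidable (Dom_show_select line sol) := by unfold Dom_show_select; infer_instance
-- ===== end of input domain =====

-- B rewrites A's single interleaved loop as two passes (select indices, then render); objective: alternative decomposition, same cost.


def COLOR_BLANCO : String := "\x1b[97m"
def COLOR_VERDE : String := "\x1b[92m"
def COLOR_GRIS : String := "\x1b[90m"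

-- ===== PORT A =====
-- A's loop: accumulator `out`, greedy pointer `k`, one coloured piece appended per char.
def showSelLoopA (sol : List Char) : List Char → Nat → String → String
  | [], _, out => out
  | c :: cs, k, out =>
    if k < sol.length ∧ sol[k]? = some c then
      showSelLoopA sol cs (k + 1) (out ++ (COLOR_VERDE ++ c.toString ++ COLOR_BLANCO))
    else
      showSelLoopA sol cs k (out ++ (COLOR_GRIS ++ c.toString))

def show_select (line : String) (sol : String) : String :=
  showSelLoopA sol.toList line.toList 0 ""

-- ===== PORT B =====
-- B pass 1: the set of selected indices (i = current index, sel = accumulated set).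
def showSelPick (sol : List Char) : List Char → Nat → Nat → PySem.Set Nat → PySem.Set Nat
  | [], _, _, sel => sel
  | c :: cs, k, i, sel =>
    if k < sol.length ∧ sol[k]? = some c then
      showSelPick sol cs (k + 1) (i + 1) (PySem.Set.add sel i)
    else
      showSelPick sol cs k (i + 1) sel

-- B pass 2: render each char by membership of its index in the selected set.
def showSelRender (sel : PySem.Set Nat) : List Char → Nat → List String
  | [], _ => []
  | c :: cs, i =>
    (if i ∈ sel then COLOR_VERDE ++ c.toString ++ COLOR_BLANCO else COLOR_GRIS ++ c.toString)
      :: showSelRender sel cs (i + 1)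

def show_select_alt (line : String) (sol : String) : String :=
  String.join (showSelRender (showSelPick sol.toList line.toList 0 0 PySem.Set.empty) line.toList 0)

-- ===== PRECONDITION & SPEC =====
def Spec_show_select (line : String) (sol : String) (out : String) : Prop := out = show_select_alt line sol
instance (line : String) (sol : String) (out : String) : Decidable (Spec_show_select line sol out) := by unfold Spec_show_select; infer_instance

-- ===== CLAIM (what is proved, stated in full; the proofs are below) =====
def Claim_equal_show_select : Prop := ∀ (line : String) (sol : String), Dom_show_select line sol → Spec_show_select line sol (show_select line sol)

-- ===== LEMMAS AND PROOFS =====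

-- the accumulator-free selection list (proof device)
def selSpec (sol : List Char) : List Char → Nat → Nat → List Nat
  | [], _, _ => []
  | c :: cs, k, i =>
    if k < sol.length ∧ sol[k]? = some c then
      i :: selSpec sol cs (k + 1) (i + 1)
    else
      selSpec sol cs k (i + 1)

theorem strFoldl_append (l : List String) : ∀ s : String,
    List.foldl (fun r t => r ++ t) s l = s ++ String.join l := by
  induction l with
  | nil => intro s; simp [String.join]
  | cons x l ih =>
    intro s
    simp only [String.join, List.foldl]
    rw [ih (s ++ x), ih ("" ++ x)]
    simp [String.append_assoc]

theorem strJoin_cons (x : String) (l : List String) :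
    String.join (x :: l) = x ++ String.join l := by
  simpa [String.join] using strFoldl_append l x

theorem selSpec_ge (sol : List Char) : ∀ (cs : List Char) (k i j : Nat),
    j ∈ selSpec sol cs k i → i ≤ j := by
  intro cs
  induction cs with
  | nil => intro k i j h; simp [selSpec] at h
  | cons c cs ih =>
    intro k i j h
    simp only [selSpec] at h
    split at h
    · rcases List.mem_cons.mp h with h | h
      · omega
      · have := ih (k + 1) (i + 1) j h; omega
    · have := ih k (i + 1) j h; omega

theorem showSelPick_eq (sol : List Char) : ∀ (cs : List Char) (k i : Nat) (sel : PySem.Set Nat),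
    (∀ j ∈ sel, j < i) → showSelPick sol cs k i sel = sel ++ selSpec sol cs k i := by
  intro cs
  induction cs with
  | nil => intro k i sel _; simp [showSelPick, selSpec]
  | cons c cs ih =>
    intro k i sel hlt
    simp only [showSelPick, selSpec]
    split
    · have hni : i ∉ sel := fun h => absurd (hlt i h) (by omega)
      have hadd : PySem.Set.add sel i = sel ++ [i] := by
        simp [PySem.Set.add, PySem.Set.contains, hni]
      rw [hadd, ih (k + 1) (i + 1) (sel ++ [i])
          (by intro j hj; rcases List.mem_append.mp hj with h | h
              · exact Nat.lt_succ_of_lt (hlt j h)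
              · simp at h; omega)]
      simp
    · exact ih k (i + 1) sel (fun j hj => Nat.lt_succ_of_lt (hlt j hj))

theorem showSelRender_skip (c0 : Nat) (s : List Nat) : ∀ (cs : List Char) (j : Nat),
    c0 < j → showSelRender (c0 :: s) cs j = showSelRender s cs j := by
  intro cs
  induction cs with
  | nil => intro j _; simp [showSelRender]
  | cons c cs ih =>
    intro j hj
    simp only [showSelRender]
    have hne : j ≠ c0 := by omega
    rw [ih (j + 1) (by omega)]
    simp [List.mem_cons, hne]

theorem showSelLoopA_eq (sol : List Char) : ∀ (cs : List Char) (k i : Nat) (out : String),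
    showSelLoopA sol cs k out = out ++ String.join (showSelRender (selSpec sol cs k i) cs i) := by
  intro cs
  induction cs with
  | nil => intro k i out; simp [showSelLoopA, showSelRender, String.join]
  | cons c cs ih =>
    intro k i out
    simp only [showSelLoopA, selSpec, showSelRender]
    split
    · rw [ih (k + 1) (i + 1)]
      rw [showSelRender_skip i _ cs (i + 1) (by omega)]
      simp [strJoin_cons, String.append_assoc]
    · rw [ih k (i + 1)]
      have hni : i ∉ selSpec sol cs k (i + 1) := fun h => by
        have := selSpec_ge sol cs k (i + 1) i h; omega
      simp [strJoin_cons, hni, String.append_assoc]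

-- ===== VERDICT (by name: the statement is the Claim_ definition above) =====
theorem show_select_spec : Claim_equal_show_select := by
  intro line sol _
  unfold Spec_show_select show_select show_select_alt
  rw [showSelPick_eq sol.toList line.toList 0 0 PySem.Set.empty
      (by intro j hj; simp [PySem.Set.empty] at hj)]
  rw [showSelLoopA_eq sol.toList line.toList 0 0 ""]
  simp [PySem.Set.empty]
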